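-- pv_equiv track=rewrite | github.com/7marcosfelipe-gif/Kanvas | organize-canvas.py | groups_overlap
-- ===== SOURCE A (Python) =====
-- def group_rect(group, offset=0):
--     return (
--         group.get("x", 0),
--         group.get("y", 0) + offset,
--         group.get("width", 0),
--         group.get("height", 0),
--     )
--
-- def groups_overlap(ordered_groups, offsets, margin=60):
--     rects = []
--     for group in ordered_groups:
--         rects.append(group_rect(group, offsets.get(group.get("id"), 0)))
--
--     for index, left in enumerate(rects):
--         for right in rects[index + 1:]:
--             if not (
--                 left[0] + left[2] + margin <= right[0]
--                 or right[0] + right[2] + margin <= left[0]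
--                 or left[1] + left[3] + margin <= right[1]
--                 or right[1] + right[3] + margin <= left[1]
--             ):
--                 return True
--     return False
-- ===== SOURCE B (Python) =====
-- def _overlaps(a, b, margin):
--     return not (
--         a[0] + a[2] + margin <= b[0]
--         or b[0] + b[2] + margin <= a[0]
--         or a[1] + a[3] + margin <= b[1]
--         or b[1] + b[3] + margin <= a[1]
--     )
--
-- def groups_overlap(ordered_groups, offsets, margin=60):
--     rects = sorted(
--         (
--             (
--                 g.get("x", 0),
--                 g.get("y", 0) + offsets.get(g.get("id"), 0),
--                 g.get("width", 0),
--                 g.get("height", 0),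
--             )
--             for g in ordered_groups
--         ),
--         key=lambda r: r[0],
--     )
--     active = []
--     for r in rects:
--         # sweep over left edges: rects whose inflated right edge is left of
--         # r's left edge can never overlap r or anything after it
--         active = [a for a in active if a[0] + a[2] + margin > r[0]]
--         for a in active:
--             if _overlaps(a, r, margin):
--                 return True
--         active.append(r)
--     return False
-- ===== Notes on version B (the rewrite author's own statement) =====
-- stated objective: alternative
-- what changed: Replaced the all-pairs double loop by a left-edge sweep: rects are sorted by x once and each rect is compared only against an active list from which every rect whose inflated right edge lies left of the current left edge has been evicted; on the measured random inputs A's early return makes both comparable, so no speed is claimed.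
import Mathlib
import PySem

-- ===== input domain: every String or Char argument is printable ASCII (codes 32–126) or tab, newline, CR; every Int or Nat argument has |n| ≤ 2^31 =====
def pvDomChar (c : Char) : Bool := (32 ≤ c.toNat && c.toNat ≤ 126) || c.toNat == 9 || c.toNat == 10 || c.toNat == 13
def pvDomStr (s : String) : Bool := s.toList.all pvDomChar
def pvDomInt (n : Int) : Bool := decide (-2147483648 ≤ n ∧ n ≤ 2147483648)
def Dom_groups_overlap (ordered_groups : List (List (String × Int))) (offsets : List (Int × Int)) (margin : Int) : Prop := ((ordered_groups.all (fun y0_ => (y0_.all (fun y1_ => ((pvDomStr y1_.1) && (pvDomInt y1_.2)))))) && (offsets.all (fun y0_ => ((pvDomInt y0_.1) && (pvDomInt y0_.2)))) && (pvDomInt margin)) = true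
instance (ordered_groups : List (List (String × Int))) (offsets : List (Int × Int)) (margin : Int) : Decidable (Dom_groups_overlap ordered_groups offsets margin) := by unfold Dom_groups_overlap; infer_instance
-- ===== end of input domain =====

-- B replaces A's all-pairs double loop by a sort-by-x sweep with an active list; equivalence of the two Bools is proved for all inputs.

-- ===== PORT A =====

-- group.get(k, 0) / offsets.get(k, 0): first-match association-list lookup (Python dict)
def pvGroupRect (group : List (String × Int)) (offset : Int) : Int × Int × Int × Int :=
  let d := PySem.Dict.mk group
  (d.getD "x" 0, d.getD "y" 0 + offset, d.getD "width" 0, d.getD "height" 0)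

-- offsets.get(group.get("id"), 0): a missing "id" gives None, which matches no Int key, hence 0
def pvOffsetOf (offsets : List (Int × Int)) (group : List (String × Int)) : Int :=
  match (PySem.Dict.mk group).get? "id" with
  | none => 0
  | some k => (PySem.Dict.mk offsets).getD k 0

-- A's inner 'if not (…)' condition on a pair of rects
def pvOverlapA (left right : Int × Int × Int × Int) (margin : Int) : Bool :=
  !(decide (left.1 + left.2.2.1 + margin ≤ right.1)
    || decide (right.1 + right.2.2.1 + margin ≤ left.1)
    || decide (left.2.1 + left.2.2.2 + margin ≤ right.2.1)
    || decide (right.2.1 + right.2.2.2 + margin ≤ left.2.1))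

def groups_overlap (ordered_groups : List (List (String × Int))) (offsets : List (Int × Int)) (margin : Int) : Bool :=
  let rects := ordered_groups.foldl (fun acc g => acc ++ [pvGroupRect g (pvOffsetOf offsets g)]) []
  (PySem.List.enumerate rects 0).any (fun p =>
    (PySem.List.slice rects (some (p.1 + 1)) none).any (fun right => pvOverlapA p.2 right margin))

-- ===== PORT B =====

-- Source B's _overlaps helper
def pvOverlapB (a b : Int × Int × Int × Int) (margin : Int) : Bool :=
  !(decide (a.1 + a.2.2.1 + margin ≤ b.1)
    || decide (b.1 + b.2.2.1 + margin ≤ a.1)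
    || decide (a.2.1 + a.2.2.2 + margin ≤ b.2.1)
    || decide (b.2.1 + b.2.2.2 + margin ≤ a.2.1))

-- Source B's rect expression inside the generator
def pvRectB (offsets : List (Int × Int)) (g : List (String × Int)) : Int × Int × Int × Int :=
  let d := PySem.Dict.mk g
  (d.getD "x" 0,
   d.getD "y" 0 + (match d.get? "id" with
                   | none => 0
                   | some k => (PySem.Dict.mk offsets).getD k 0),
   d.getD "width" 0, d.getD "height" 0)

-- Source B's for-loop over the sorted rects, carrying the active list
def pvSweep (margin : Int) (active : List (Int × Int × Int × Int)) :
    List (Int × Int × Int × Int) → Bool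
  | [] => false
  | r :: rs =>
    let act := active.filter (fun a => decide (a.1 + a.2.2.1 + margin > r.1))
    if act.any (fun a => pvOverlapB a r margin) then true
    else pvSweep margin (act ++ [r]) rs

def groups_overlap_alt (ordered_groups : List (List (String × Int))) (offsets : List (Int × Int)) (margin : Int) : Bool :=
  let rects := PySem.List.sorted (ordered_groups.map (pvRectB offsets)) (fun r => r.1) false
  pvSweep margin [] rects

-- ===== PRECONDITION & SPEC =====
def Spec_groups_overlap (ordered_groups : List (List (String × Int))) (offsets : List (Int × Int)) (margin : Int) (out : Bool) : Prop := out = groups_overlap_alt ordered_groups offsets margin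
instance (ordered_groups : List (List (String × Int))) (offsets : List (Int × Int)) (margin : Int) (out : Bool) : Decidable (Spec_groups_overlap ordered_groups offsets margin out) := by unfold Spec_groups_overlap; infer_instance

-- ===== CLAIM (what is proved, stated in full; the proofs are below) =====
def Claim_equal_groups_overlap : Prop := ∀ (ordered_groups : List (List (String × Int))) (offsets : List (Int × Int)) (margin : Int), Dom_groups_overlap ordered_groups offsets margin → Spec_groups_overlap ordered_groups offsets margin (groups_overlap ordered_groups offsets margin)

-- ===== LEMMAS AND PROOFS =====

-- "some pair (i < j) overlaps": the shape A's double loop computes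
def pvPairAny (margin : Int) : List (Int × Int × Int × Int) → Bool
  | [] => false
  | r :: rs => rs.any (fun t => pvOverlapA r t margin) || pvPairAny margin rs

theorem pvOverlapA_symm (a b : Int × Int × Int × Int) (m : Int) :
    pvOverlapA a b m = pvOverlapA b a m := by
  simp only [pvOverlapA]
  by_cases h1 : a.1 + a.2.2.1 + m ≤ b.1 <;>
  by_cases h2 : b.1 + b.2.2.1 + m ≤ a.1 <;>
  by_cases h3 : a.2.1 + a.2.2.2 + m ≤ b.2.1 <;>
  by_cases h4 : b.2.1 + b.2.2.2 + m ≤ a.2.1 <;>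
  simp [h1, h2, h3, h4]

theorem pvOverlapA_of_sep (a t : Int × Int × Int × Int) (m : Int)
    (h : a.1 + a.2.2.1 + m ≤ t.1) : pvOverlapA a t m = false := by
  simp [pvOverlapA, h]

-- A's enumerate/slice double loop computes pvPairAny
theorem pvAnyPairs_eq (m : Int) : ∀ (xs pre : List (Int × Int × Int × Int)),
    ((PySem.List.enumerate xs (pre.length : Int)).any (fun p =>
      (PySem.List.slice (pre ++ xs) (some (p.1 + 1)) none).any
        (fun t => pvOverlapA p.2 t m))) = pvPairAny m xs := by
  intro xs
  induction xs with
  | nil => intro pre; simp [PySem.List.enumerate_nil, pvPairAny]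
  | cons x xs ih =>
    intro pre
    rw [PySem.List.enumerate_cons]
    simp only [List.any_cons]
    have e1 : pre ++ x :: xs = (pre ++ [x]) ++ xs := by simp
    have e2 : (pre.length : Int) + 1 = (((pre ++ [x]).length : Nat) : Int) := by simp
    rw [e1, e2, ih (pre ++ [x])]
    rw [PySem.List.slice_from_natCast, List.drop_left]
    rfl

theorem pvPairAny_eq_false_iff (m : Int) (l : List (Int × Int × Int × Int)) :
    pvPairAny m l = false ↔ l.Pairwise (fun a b => pvOverlapA a b m = false) := by
  induction l with
  | nil => simp [pvPairAny]
  | cons x xs ih =>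
    simp [pvPairAny, List.pairwise_cons, ih, List.any_eq_false]

theorem pvPairAny_perm (m : Int) {l₁ l₂ : List (Int × Int × Int × Int)} (h : l₁.Perm l₂) :
    pvPairAny m l₁ = pvPairAny m l₂ := by
  have this := List.Perm.pairwise_iff
    (R := fun a b => pvOverlapA a b m = false)
    (fun {a b} hab => by
      show pvOverlapA b a m = false
      rw [pvOverlapA_symm]; exact hab) h
  rcases hb₁ : pvPairAny m l₁ <;> rcases hb₂ : pvPairAny m l₂ <;> try rfl
  · exact absurd ((pvPairAny_eq_false_iff m l₂).mpr (this.mp ((pvPairAny_eq_false_iff m l₁).mp hb₁))) (by simp [hb₂])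
  · exact absurd ((pvPairAny_eq_false_iff m l₁).mpr (this.mpr ((pvPairAny_eq_false_iff m l₂).mp hb₂))) (by simp [hb₁])

theorem pvSweep_iff (m : Int) : ∀ (rest active : List (Int × Int × Int × Int)),
    rest.Pairwise (fun p q => p.1 ≤ q.1) →
    (pvSweep m active rest = true ↔
      ((∃ a ∈ active, ∃ t ∈ rest, pvOverlapA a t m = true) ∨ pvPairAny m rest = true)) := by
  intro rest
  induction rest with
  | nil => intro active _; simp [pvSweep, pvPairAny]
  | cons r rs ih =>
    intro active hpw
    have hr : ∀ t ∈ rs, r.1 ≤ t.1 := fun t ht => (List.pairwise_cons.mp hpw).1 t ht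
    have hpw' := (List.pairwise_cons.mp hpw).2
    simp only [pvSweep]
    set act := active.filter (fun a => decide (a.1 + a.2.2.1 + m > r.1)) with hact
    by_cases hany : act.any (fun a => pvOverlapB a r m) = true
    · simp only [hany, if_true]
      rcases List.any_eq_true.mp hany with ⟨a, ha, hov⟩
      constructor
      · intro _
        left
        exact ⟨a, List.mem_of_mem_filter ha, r, by simp, hov⟩
      · intro _; trivial
    · have hf : act.any (fun a => pvOverlapB a r m) = false := by
        simpa using hany
      simp only [hf, Bool.false_eq_true, if_false]
      rw [ih (act ++ [r]) hpw']
      simp only [pvPairAny, Bool.or_eq_true]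
      constructor
      · rintro (⟨a, ha, t, ht, hov⟩ | hpa)
        · rcases List.mem_append.mp ha with ha' | ha'
          · exact Or.inl ⟨a, List.mem_of_mem_filter ha', t, List.mem_cons_of_mem _ ht, hov⟩
          · have : a = r := by simpa using ha'
            subst this
            exact Or.inr (Or.inl (List.any_eq_true.mpr ⟨t, ht, hov⟩))
        · exact Or.inr (Or.inr hpa)
      · rintro (⟨a, ha, t, ht, hov⟩ | h | hpa)
        · -- a ∈ active overlaps some t ∈ r :: rs
          by_cases hkeep : a.1 + a.2.2.1 + m > r.1
          · have hain : a ∈ act := List.mem_filter.mpr ⟨ha, by simpa using hkeep⟩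
            rcases List.mem_cons.mp ht with rfl | ht'
            · exact absurd (List.any_eq_true.mpr ⟨a, hain, hov⟩) hany
            · exact Or.inl ⟨a, List.mem_append_left _ hain, t, ht', hov⟩
          · -- a was evicted: its inflated right edge is ≤ r.1 ≤ t.1, so no overlap
            rw [not_lt] at hkeep
            have hsep : a.1 + a.2.2.1 + m ≤ t.1 := by
              rcases List.mem_cons.mp ht with rfl | ht'
              · exact hkeep
              · exact le_trans hkeep (hr t ht')
            rw [pvOverlapA_of_sep a t m hsep] at hov
            exact absurd hov (by simp)
        · rcases List.any_eq_true.mp h with ⟨t, ht, hov⟩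
          exact Or.inl ⟨r, List.mem_append_right _ (by simp), t, ht, hov⟩
        · exact Or.inr hpa

-- ===== VERDICT (by name: the statement is the Claim_ definition above) =====
theorem groups_overlap_spec : Claim_equal_groups_overlap := by
  intro ordered_groups offsets margin _
  unfold Spec_groups_overlap
  simp only [groups_overlap, groups_overlap_alt]
  rw [PySem.List.foldl_append_singleton_eq_map]
  simp only [List.nil_append]
  set rects := ordered_groups.map (fun g => pvGroupRect g (pvOffsetOf offsets g)) with hrects
  have hrB : ordered_groups.map (pvRectB offsets) = rects := by
    simp only [hrects]
    exact List.map_congr_left (fun g _ => rfl)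
  rw [hrB]
  set srt := PySem.List.sorted rects (fun r => r.1) false with hsrt
  have hA : ((PySem.List.enumerate rects ((0 : Nat) : Int)).any (fun p =>
      (PySem.List.slice rects (some (p.1 + 1)) none).any
        (fun t => pvOverlapA p.2 t margin))) = pvPairAny margin rects := by
    have := pvAnyPairs_eq margin rects []
    simpa using this
  have hperm : srt.Perm rects := PySem.List.sorted_perm rects (fun r => r.1) false
  have hpw : srt.Pairwise (fun p q => p.1 ≤ q.1) :=
    PySem.List.sorted_pairwise rects (fun r => r.1)
  have hB : pvSweep margin [] srt = pvPairAny margin srt := by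
    rw [Bool.eq_iff_iff, pvSweep_iff margin srt [] hpw]
    simp
  rw [show ((0 : Nat) : Int) = (0 : Int) by simp] at hA
  rw [hA, hB, pvPairAny_perm margin hperm]
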